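-- pv_equiv track=rewrite | github.com/WallerTsai/OJ-Solution | leetcode-py/数论/遍历数位/No3697.py | decimalRepresentation
-- ===== SOURCE A (Python) =====
-- from typing import List
--
-- def decimalRepresentation(n: int) -> List[int]:
--     ans = []
--     pow10 = 1
--     while n:
--         n, d = divmod(n, 10)
--         if d:
--             ans.append(d * pow10)
--         pow10 *= 10
--     ans.reverse()
--     return ans
-- ===== SOURCE B (Python) =====
-- from typing import List
--
-- def decimalRepresentation(n: int) -> List[int]:
--     s = str(n)
--     L = len(s)
--     return [(ord(c) - 48) * 10 ** (L - 1 - i) for i, c in enumerate(s) if c != '0']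
-- ===== Notes on version B (the rewrite author's own statement) =====
-- stated objective: idiomatic
-- what changed: B replaces A's divmod loop (little-endian digit extraction with a running power and a final reverse) by a single left-to-right comprehension over the decimal string str(n), computing each place value from the position, so no arithmetic digit loop and no reversal.
-- outside the precondition, e.g. on decimalRepresentation(-7): A does not finish within the time limit, B returns [-30, 7]
import Mathlib
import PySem

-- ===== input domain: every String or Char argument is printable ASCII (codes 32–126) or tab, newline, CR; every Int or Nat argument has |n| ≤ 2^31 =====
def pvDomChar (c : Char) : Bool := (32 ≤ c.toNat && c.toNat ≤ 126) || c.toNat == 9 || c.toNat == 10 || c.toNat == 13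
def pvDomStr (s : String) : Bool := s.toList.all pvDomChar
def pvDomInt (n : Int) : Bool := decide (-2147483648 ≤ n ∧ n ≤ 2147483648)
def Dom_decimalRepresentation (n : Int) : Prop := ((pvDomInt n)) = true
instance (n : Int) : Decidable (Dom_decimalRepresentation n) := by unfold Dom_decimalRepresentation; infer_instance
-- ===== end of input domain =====

-- B lists the nonzero decimal digits times their place value by one left-to-right pass
-- over str(n) instead of A's divmod loop with a final reverse (objective: more idiomatic).

-- ===== PORT A =====
-- the while loop of A; fuel n.natAbs + 1 suffices for every n ≥ 0 (Pre_ excludes n < 0,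
-- where the Python loop never terminates)
def pvALoop : Nat → Int → Int → List Int → List Int
  | 0, _, _, ans => ans
  | fuel + 1, n, pow10, ans =>
    if n = 0 then ans
    else
      let d := PySem.Int.mod n 10
      let n' := PySem.Int.floordiv n 10
      pvALoop fuel n' (pow10 * 10) (if d ≠ 0 then ans ++ [d * pow10] else ans)

def decimalRepresentation (n : Int) : List Int :=
  (pvALoop (n.natAbs + 1) n 1 []).reverse

-- ===== PORT B =====
-- [(ord(c) - 48) * 10 ** (L - 1 - i) for i, c in enumerate(s) if c != '0'] with s = str(n);
-- ord(c) is c.toNat (exact on ASCII), and the exponent L - 1 - i is ≥ 0 for every index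
-- enumerate yields, so .toNat is exact there.
def decimalRepresentation_alt (n : Int) : List Int :=
  let cs := PySem.Int.toChars n
  let L : Int := cs.length
  ((PySem.List.enumerate cs).filter (fun p => p.2 ≠ '0')).map
    (fun p => ((p.2.toNat : Int) - 48) * 10 ^ (L - 1 - p.1).toNat)

-- ===== PRECONDITION & SPEC =====
-- Pre_ excludes n < 0, on which Python A never terminates (divmod floors, so n stays -1).
def Pre_decimalRepresentation (n : Int) : Prop := 0 ≤ n
instance (n : Int) : Decidable (Pre_decimalRepresentation n) := by
  unfold Pre_decimalRepresentation; infer_instance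

def pvWitness_decimalRepresentation : Int := 102

def Spec_decimalRepresentation (n : Int) (out : List Int) : Prop := out = decimalRepresentation_alt n
instance (n : Int) (out : List Int) : Decidable (Spec_decimalRepresentation n out) := by
  unfold Spec_decimalRepresentation; infer_instance

-- ===== CLAIM (what is proved, stated in full; the proofs are below) =====
def Claim_equal_decimalRepresentation : Prop := ∀ (n : Int), Dom_decimalRepresentation n → Pre_decimalRepresentation n → Spec_decimalRepresentation n (decimalRepresentation n)

-- ===== LEMMAS AND PROOFS =====

-- little-endian weighted nonzero digits of m, place value starting at 10^k
-- (the list A's loop builds before the final reverse)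
def pvG (m k : Nat) : List Int :=
  if m = 0 then []
  else (if m % 10 ≠ 0 then [((m % 10 : Nat) : Int) * 10 ^ k] else []) ++ pvG (m / 10) (k + 1)
  decreasing_by exact Nat.div_lt_self (Nat.pos_of_ne_zero (by assumption)) (by norm_num)

-- big-endian decimal character list of m (what Nat.toDigits 10 m computes)
def pvD (m : Nat) : List Char :=
  (if h : m / 10 = 0 then [] else pvD (m / 10)) ++ [Nat.digitChar (m % 10)]
  decreasing_by
    exact Nat.div_lt_self (by omega) (by norm_num)

-- B's comprehension evaluated structurally on the character list, with place values
-- read off the remaining length plus k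
def pvE (cs : List Char) (k : Nat) : List Int :=
  match cs with
  | [] => []
  | c :: t =>
    (if c ≠ '0' then [((c.toNat : Int) - 48) * 10 ^ (t.length + k)] else []) ++ pvE t k

theorem pvALoop_spec (fuel : Nat) : ∀ (m k : Nat) (ans : List Int), m < fuel →
    pvALoop fuel (m : Int) (10 ^ k) ans = ans ++ pvG m k := by
  induction fuel with
  | zero => intro m k ans h; omega
  | succ f ih =>
    intro m k ans h
    by_cases hm : m = 0
    · subst hm; simp [pvALoop, pvG]
    · rw [pvALoop]
      have hmod : PySem.Int.mod (m : Int) 10 = ((m % 10 : Nat) : Int) := by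
        have := PySem.Int.mod_natCast m 10; exact_mod_cast this
      have hdiv : PySem.Int.floordiv (m : Int) 10 = ((m / 10 : Nat) : Int) := by
        have := PySem.Int.floordiv_natCast m 10; exact_mod_cast this
      have hlt : m / 10 < f := by
        have := Nat.div_lt_self (Nat.pos_of_ne_zero hm) (show 1 < 10 by norm_num)
        omega
      have hpow : (10 : Int) ^ k * 10 = 10 ^ (k + 1) := by ring
      simp only [if_neg (by exact_mod_cast hm : ¬ ((m : Int) = 0)), hmod, hdiv, hpow]
      rw [ih (m / 10) (k + 1) _ hlt]
      conv_rhs => rw [pvG]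
      rw [if_neg hm]
      split_ifs with h1 h2 h2 <;> simp_all <;> omega

theorem pvToDigitsCore_spec (fuel : Nat) : ∀ (m : Nat) (ds : List Char), m < fuel →
    Nat.toDigitsCore 10 fuel m ds = pvD m ++ ds := by
  induction fuel with
  | zero => intro m ds h; omega
  | succ f ih =>
    intro m ds h
    rw [Nat.toDigitsCore]
    by_cases h10 : m / 10 = 0
    · simp [h10, pvD]
    · have hm : m ≠ 0 := by intro hm; simp [hm] at h10
      have hlt : m / 10 < f := by
        have h1 := Nat.div_lt_self (Nat.pos_of_ne_zero hm) (show 1 < 10 by norm_num)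
        have h2 : 1 ≤ m / 10 := Nat.pos_of_ne_zero h10
        omega
      simp only [if_neg h10]
      rw [ih (m / 10) _ hlt]
      conv_rhs => rw [pvD]
      rw [dif_neg h10]
      simp

theorem pvToChars_eq (m : Nat) : PySem.Int.toChars (m : Int) = pvD m := by
  have hnn : ¬ ((m : Int) < 0) := by exact_mod_cast Int.not_lt.mpr (Int.natCast_nonneg m)
  simp only [PySem.Int.toChars, if_neg hnn, Int.toNat_natCast]
  unfold Nat.toDigits
  simpa using pvToDigitsCore_spec (m + 1) m [] (Nat.lt_succ_self m)

theorem pvE_append (xs ys : List Char) (k : Nat) :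
    pvE (xs ++ ys) k = pvE xs (ys.length + k) ++ pvE ys k := by
  induction xs with
  | nil => simp [pvE]
  | cons c t ih =>
    simp only [List.cons_append, pvE, ih, List.length_append]
    rw [Nat.add_assoc, List.append_assoc]

-- digit characters below 10
theorem pvDigitChar_toNat (d : Nat) (h : d < 10) : ((Nat.digitChar d).toNat : Int) - 48 = (d : Int) := by
  interval_cases d <;> decide

theorem pvDigitChar_ne_zero (d : Nat) (h : d < 10) : (Nat.digitChar d ≠ '0') ↔ d ≠ 0 := by
  interval_cases d <;> simp <;> decide

-- B's mapped-filtered enumeration equals the structural pvE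
theorem pvEnum_spec (cs : List Char) : ∀ (s : Int) (k : Nat),
    ((PySem.List.enumerate cs s).filter (fun p => p.2 ≠ '0')).map
      (fun p => ((p.2.toNat : Int) - 48) * 10 ^ (((cs.length : Int) + s - 1 - p.1).toNat + k))
    = pvE cs k := by
  induction cs with
  | nil => intro s k; simp [PySem.List.enumerate, pvE]
  | cons c t ih =>
    intro s k
    have henum : PySem.List.enumerate (c :: t) s = (s, c) :: PySem.List.enumerate t (s + 1) := rfl
    have hfun : (fun p : Int × Char => ((p.2.toNat : Int) - 48) * 10 ^ ((((c :: t).length : Int) + s - 1 - p.1).toNat + k))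
              = (fun p : Int × Char => ((p.2.toNat : Int) - 48) * 10 ^ (((t.length : Int) + (s + 1) - 1 - p.1).toNat + k)) := by
      funext p
      have h1 : (((c :: t).length : Int) + s - 1 - p.1) = ((t.length : Int) + (s + 1) - 1 - p.1) := by
        push_cast [List.length_cons]; ring
      rw [h1]
    rw [henum, List.filter_cons]
    by_cases hc : c = '0'
    · rw [if_neg (by simp [hc])]
      rw [hfun, ih]
      simp [pvE, hc]
    · rw [if_pos (by simp [hc])]
      rw [List.map_cons, hfun, ih]
      have h3 : ((((c :: t).length : Int) + s - 1 - (s, c).1).toNat + k) = t.length + k := by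
        push_cast [List.length_cons]; omega
      rw [h3]
      simp [pvE, hc]

theorem pvE_pvD (m : Nat) : ∀ k, pvE (pvD m) k = (pvG m k).reverse := by
  induction m using Nat.strong_induction_on with
  | _ m ih =>
    intro k
    by_cases h10 : m / 10 = 0
    · have hlt : m % 10 < 10 := Nat.mod_lt _ (by norm_num)
      rw [pvD, dif_pos h10]
      by_cases hm : m = 0
      · subst hm; simp [pvG, pvE, Nat.digitChar]
      · have hmod : m % 10 = m := by omega
        have hmz : m % 10 ≠ 0 := by omega
        rw [pvG, if_neg hm, if_pos hmz, pvG, if_pos h10]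
        simp only [List.nil_append, pvE, List.length_nil, Nat.zero_add]
        rw [if_pos ((pvDigitChar_ne_zero _ hlt).mpr hmz)]
        simp [pvDigitChar_toNat _ hlt]
    · have hm : m ≠ 0 := by intro hm; simp [hm] at h10
      rw [pvD, dif_neg h10]
      rw [pvE_append]
      simp only [List.length_cons, List.length_nil, Nat.zero_add, Nat.add_comm 1 k]
      rw [ih (m / 10) (Nat.div_lt_self (Nat.pos_of_ne_zero hm) (by norm_num)) (k + 1)]
      have hlt : m % 10 < 10 := Nat.mod_lt _ (by norm_num)
      conv_rhs => rw [pvG]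
      rw [if_neg hm, List.reverse_append]
      congr 1
      by_cases hd : m % 10 = 0
      · simp [pvE, hd, Nat.digitChar]
      · simp only [pvE, if_pos ((pvDigitChar_ne_zero _ hlt).mpr hd)]
        simp [pvDigitChar_toNat _ hlt, hd]

-- ===== VERDICT (by name: the statement is the Claim_ definition above) =====
theorem decimalRepresentation_spec : Claim_equal_decimalRepresentation := by
  intro n _ hpre
  unfold Spec_decimalRepresentation
  obtain ⟨m, rfl⟩ := Int.eq_ofNat_of_zero_le hpre
  unfold decimalRepresentation decimalRepresentation_alt
  have hA : pvALoop ((m : Int).natAbs + 1) (m : Int) 1 [] = pvG m 0 := by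
    have := pvALoop_spec (m + 1) m 0 [] (Nat.lt_succ_self m)
    simpa [Int.natAbs_natCast] using this
  rw [hA, pvToChars_eq]
  have hB := pvEnum_spec (pvD m) 0 0
  simp only [Int.add_zero, Nat.add_zero] at hB
  rw [hB, pvE_pvD]
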